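-- pv_equiv track=rewrite | github.com/RainRat/diff2typo | gentypos.py | generate_typos_by_replacement
-- ===== SOURCE A (Python) =====
-- from typing import Any, Iterable, Mapping, MutableMapping, Sequence, Set, Optional
--
-- def generate_typos_by_replacement(
--     word: str,
--     adjacent_keys: Mapping[str, Set[str]],
--     custom_subs: Mapping[str, Set[str]] | None = None,
--     use_adjacent: bool = True,
--     use_custom: bool = True,
-- ) -> set[str]:
--     """
--     Generate typos by replacing characters or substrings with adjacent keys or custom substitutions.
--
--     Args:
--         word (str): The input word.
--         adjacent_keys (dict): Mapping of each character to its adjacent keys.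
--         custom_subs (dict, optional): Custom substitution rules (supports multi-character keys).
--         use_adjacent (bool): Whether to include adjacent key substitutions.
--         use_custom (bool): Whether to include custom substitutions.
--
--     Returns:
--         set: A set of typo variations generated by replacement.
--     """
--     typos = set()
--
--     # Character-by-character replacements (handles adjacent keys and single-char custom subs)
--     for i, char in enumerate(word):
--         replacement_chars = set()
--
--         # Adjacent key replacements
--         if use_adjacent and char in adjacent_keys:
--             replacement_chars.update(adjacent_keys[char])
--
--         # Custom substitutions (single character)
--         if use_custom and custom_subs and char in custom_subs:
--             replacement_chars.update(custom_subs[char])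
--
--         for replace_char in replacement_chars:
--             typo = word[:i] + replace_char + word[i+1:]
--             typos.add(typo)
--
--     # Multi-character substring replacements
--     if use_custom and custom_subs:
--         for sub_key, sub_values in custom_subs.items():
--             if len(sub_key) > 1:
--                 start = 0
--                 while True:
--                     idx = word.find(sub_key, start)
--                     if idx == -1:
--                         break
--                     for replace_val in sub_values:
--                         typo = word[:idx] + replace_val + word[idx + len(sub_key):]
--                         typos.add(typo)
--                     start = idx + 1
--
--     return typos
-- ===== SOURCE B (Python) =====
-- def _occurrence_index(word, keys):
--     """One left-to-right scan of word: at each position hash the slice of every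
--     key length; returns {key: ascending list of start indices (overlaps included)}."""
--     key_set = set(keys)
--     lengths = set(len(k) for k in keys)
--     occ = {}
--     for i in range(len(word)):
--         for L in lengths:
--             seg = word[i:i+L]
--             if len(seg) == L and seg in key_set:
--                 occ.setdefault(seg, []).append(i)
--     return occ
--
--
-- def _char_reps(ch, adjacent_keys, custom_subs, use_adjacent, use_c):
--     reps = []
--     if use_adjacent and ch in adjacent_keys:
--         reps += adjacent_keys[ch]
--     if use_c and ch in custom_subs:
--         reps += custom_subs[ch]
--     return reps
--
--
-- def generate_typos_by_replacement(word, adjacent_keys, custom_subs=None, use_adjacent=True, use_custom=True):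
--     """Generate-then-deduplicate pipeline: candidates are enumerated declaratively
--     as one flat list; multi-char occurrences come from a single positional scan
--     shared by all keys instead of a find loop per key; the set is formed once."""
--     use_c = bool(use_custom and custom_subs)
--     singles = [word[:i] + r + word[i+1:]
--                for i, ch in enumerate(word)
--                for r in _char_reps(ch, adjacent_keys, custom_subs, use_adjacent, use_c)]
--     multis = []
--     if use_c:
--         occ = _occurrence_index(word, [k for k in custom_subs if len(k) > 1])
--         multis = [word[:i] + v + word[i+len(k):]
--                   for k, vs in custom_subs.items() if len(k) > 1
--                   for i in occ.get(k, [])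
--                   for v in vs]
--     return set(singles + multis)
-- ===== Notes on version B (the rewrite author's own statement) =====
-- stated objective: alternative
-- what changed: B replaces A's incremental mutation of a typo set (per-position merging of replacement sets and a per-key while-loop around str.find) by a generate-then-deduplicate pipeline: one positional scan of the word builds an occurrence index for all multi-char keys at once by hashing the slice of each key length, all candidate strings are enumerated declaratively as one flat list, and the set is formed once at the end.
import Mathlib
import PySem

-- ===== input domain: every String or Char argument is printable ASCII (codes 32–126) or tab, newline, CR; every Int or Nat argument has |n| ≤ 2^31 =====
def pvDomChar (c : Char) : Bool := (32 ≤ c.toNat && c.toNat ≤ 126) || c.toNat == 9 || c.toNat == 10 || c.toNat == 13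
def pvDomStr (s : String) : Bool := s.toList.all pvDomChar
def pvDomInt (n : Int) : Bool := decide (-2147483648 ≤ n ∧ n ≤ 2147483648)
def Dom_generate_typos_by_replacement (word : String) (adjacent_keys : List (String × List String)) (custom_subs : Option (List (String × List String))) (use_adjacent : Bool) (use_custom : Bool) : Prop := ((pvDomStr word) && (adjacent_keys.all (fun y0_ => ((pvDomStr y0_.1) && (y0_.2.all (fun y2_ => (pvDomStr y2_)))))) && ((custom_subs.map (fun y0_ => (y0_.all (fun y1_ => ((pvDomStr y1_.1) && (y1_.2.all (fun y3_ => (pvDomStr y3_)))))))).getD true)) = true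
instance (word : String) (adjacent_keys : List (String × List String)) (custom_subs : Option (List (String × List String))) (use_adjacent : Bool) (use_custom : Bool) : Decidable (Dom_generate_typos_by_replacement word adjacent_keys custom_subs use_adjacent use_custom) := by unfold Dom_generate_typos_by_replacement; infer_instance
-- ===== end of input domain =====

-- B replaces A's incremental set mutation (per-position set merging and a find while-loop per
-- multi-char key) by a generate-then-deduplicate pipeline: one positional scan builds an
-- occurrence index for all multi-char keys at once, all candidates are enumerated as one flat
-- list, and the set is formed once at the end (objective: alternative decomposition).

-- ===== PORT A =====

-- word[:i] + rep + word[i+n:]  (exact for the nonnegative i both ports use)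
def pvSubst (w : List Char) (i n : Nat) (rep : String) : String :=
  String.ofList (w.take i ++ rep.toList ++ w.drop (i + n))

-- truthiness of `use_custom and custom_subs` (None and the empty dict are falsy)
def pvUseCustom (use_custom : Bool) (custom_subs : Option (List (String × List String))) : Bool :=
  use_custom && (match custom_subs with | some l => !l.isEmpty | none => false)

-- A's `while True: idx = word.find(sub_key, start) …` loop; `start` strictly increases each
-- round and find fails once start exceeds len(word), so w.length + 2 rounds of fuel suffice.
def pvFindLoopA (w : List Char) (key : List Char) (vals : List String) :
    Nat → Int → PySem.Set String → PySem.Set String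
  | 0, _, typos => typos
  | fuel+1, start, typos =>
    let idx := PySem.Chars.findFrom w key start none
    if idx = -1 then typos
    else pvFindLoopA w key vals fuel (idx + 1)
      (vals.foldl (fun t v => PySem.Set.add t (pvSubst w idx.toNat key.length v)) typos)

def generate_typos_by_replacement (word : String) (adjacent_keys : List (String × List String)) (custom_subs : Option (List (String × List String))) (use_adjacent : Bool) (use_custom : Bool) : List String :=
  let w := word.toList
  let cs := custom_subs.getD []
  let useC := pvUseCustom use_custom custom_subs
  -- character-by-character replacements
  let typos1 := (PySem.List.enumerate w 0).foldl
    (fun typos p =>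
      let c := String.ofList [p.2]
      let rc : PySem.Set String := PySem.Set.empty
      let rc := if use_adjacent && (PySem.Dict.mk adjacent_keys).contains c
        then PySem.Set.update rc ((PySem.Dict.mk adjacent_keys).getD c []) else rc
      let rc := if useC && (PySem.Dict.mk cs).contains c
        then PySem.Set.update rc ((PySem.Dict.mk cs).getD c []) else rc
      rc.foldl (fun t r => PySem.Set.add t (pvSubst w p.1.toNat 1 r)) typos)
    PySem.Set.empty
  -- multi-character substring replacements
  if useC then
    cs.foldl (fun t p => if 1 < p.1.toList.length
      then pvFindLoopA w p.1.toList p.2 (w.length + 2) 0 t else t) typos1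
  else typos1

-- ===== PORT B =====

-- _char_reps(ch, …): the single-character replacement list for one position
def pvCharReps (adjacent_keys cs : List (String × List String)) (useA useC : Bool)
    (c : String) : List String :=
  (if useA && (PySem.Dict.mk adjacent_keys).contains c
    then (PySem.Dict.mk adjacent_keys).getD c [] else [])
  ++ (if useC && (PySem.Dict.mk cs).contains c
    then (PySem.Dict.mk cs).getD c [] else [])

-- _occurrence_index(word, keys): one scan over positions; at each position the slice of
-- every key length is hashed against the key set; occurrences of all keys in one pass
def pvOccIndex (w : List Char) (keys : List String) : PySem.Dict String (List Int) :=
  let keySet : PySem.Set String := PySem.Set.ofList keys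
  let lengths : PySem.Set Int := PySem.Set.ofList (keys.map (fun k => (k.toList.length : Int)))
  (PySem.List.pyRange 0 (w.length : Int) 1).foldl
    (fun d i => lengths.foldl
      (fun d L =>
        let seg := String.ofList (PySem.List.slice w (some i) (some (i + L)))
        if ((seg.toList.length : Int) == L) && keySet.contains seg
        then d.modify seg [] (· ++ [i]) else d)
      d)
    PySem.Dict.empty

def generate_typos_by_replacement_alt (word : String) (adjacent_keys : List (String × List String)) (custom_subs : Option (List (String × List String))) (use_adjacent : Bool) (use_custom : Bool) : List String :=
  let w := word.toList
  let cs := custom_subs.getD []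
  let useC := pvUseCustom use_custom custom_subs
  -- singles: flat comprehension over positions and their replacement characters
  let singles := (PySem.List.enumerate w 0).flatMap
    (fun p => (pvCharReps adjacent_keys cs use_adjacent useC (String.ofList [p.2])).map
      (fun r => pvSubst w p.1.toNat 1 r))
  -- multis: occurrence index built once, then a flat comprehension over keys/indices/values
  let multis := if useC then
      let occ := pvOccIndex w ((cs.map Prod.fst).filter (fun k => 1 < k.toList.length))
      cs.flatMap (fun p => if 1 < p.1.toList.length
        then (occ.getD p.1 []).flatMap
          (fun i => p.2.map (fun v => pvSubst w i.toNat p.1.toList.length v))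
        else [])
    else []
  PySem.Set.ofList (singles ++ multis)

-- ===== PRECONDITION & SPEC =====
def Spec_generate_typos_by_replacement (word : String) (adjacent_keys : List (String × List String)) (custom_subs : Option (List (String × List String))) (use_adjacent : Bool) (use_custom : Bool) (out : List String) : Prop := out = generate_typos_by_replacement_alt word adjacent_keys custom_subs use_adjacent use_custom
instance (word : String) (adjacent_keys : List (String × List String)) (custom_subs : Option (List (String × List String))) (use_adjacent : Bool) (use_custom : Bool) (out : List String) : Decidable (Spec_generate_typos_by_replacement word adjacent_keys custom_subs use_adjacent use_custom out) := by unfold Spec_generate_typos_by_replacement; infer_instance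

-- ===== CLAIM (what is proved, stated in full; the proofs are below) =====
def Claim_equal_generate_typos_by_replacement : Prop := ∀ (word : String) (adjacent_keys : List (String × List String)) (custom_subs : Option (List (String × List String))) (use_adjacent : Bool) (use_custom : Bool), Dom_generate_typos_by_replacement word adjacent_keys custom_subs use_adjacent use_custom → Spec_generate_typos_by_replacement word adjacent_keys custom_subs use_adjacent use_custom (generate_typos_by_replacement word adjacent_keys custom_subs use_adjacent use_custom)

-- ===== LEMMAS AND PROOFS =====

-- folding Set.add over the deduplicated list adds exactly what folding over the raw list adds
theorem pv_foldl_add_ofList {α β : Type} [BEq α] [LawfulBEq α] [BEq β] [LawfulBEq β]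
    (f : α → β) (l : List α) (t : PySem.Set β) :
    (PySem.Set.ofList l).foldl (fun t r => PySem.Set.add t (f r)) t
      = l.foldl (fun t r => PySem.Set.add t (f r)) t := by
  induction l using List.reverseRecOn with
  | nil => rfl
  | append_singleton xs x ih =>
    rw [PySem.Set.ofList_append_singleton, List.foldl_append, List.foldl_cons, List.foldl_nil]
    by_cases hm : x ∈ PySem.Set.ofList xs
    · rw [PySem.Set.add_of_mem hm, ih]
      have hx : f x ∈ xs.foldl (fun t r => PySem.Set.add t (f r)) t :=
        (PySem.Set.mem_foldl_add _ _ _ _).mpr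
          (Or.inr ⟨x, (PySem.Set.mem_ofList _ _).mp hm, rfl⟩)
      rw [PySem.Set.add_of_mem hx]
    · rw [PySem.Set.add_of_not_mem hm, List.foldl_append, List.foldl_cons, List.foldl_nil, ih]

-- A's per-position replacement set is the dedup of B's per-position replacement list
theorem pv_rc_eq_ofList (adjacent_keys cs : List (String × List String))
    (useA useC : Bool) (c : String) :
    (if useC && (PySem.Dict.mk cs).contains c
      then PySem.Set.update
        (if useA && (PySem.Dict.mk adjacent_keys).contains c
          then PySem.Set.update PySem.Set.empty ((PySem.Dict.mk adjacent_keys).getD c [])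
          else PySem.Set.empty)
        ((PySem.Dict.mk cs).getD c [])
      else (if useA && (PySem.Dict.mk adjacent_keys).contains c
        then PySem.Set.update PySem.Set.empty ((PySem.Dict.mk adjacent_keys).getD c [])
        else PySem.Set.empty))
    = PySem.Set.ofList (pvCharReps adjacent_keys cs useA useC c) := by
  by_cases hA : (useA && (PySem.Dict.mk adjacent_keys).contains c) = true <;>
    by_cases hC : (useC && (PySem.Dict.mk cs).contains c) = true <;>
      simp only [pvCharReps, hA, hC, if_true, if_false, Bool.false_eq_true,
        List.append_nil, List.nil_append]
  · rw [PySem.Set.ofList_append, PySem.Set.update_empty]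
  · rw [PySem.Set.update_empty]
  · rw [PySem.Set.update_empty]
  · rfl

-- filtering a duplicate-free list for one of its elements leaves exactly that element
theorem pv_filter_eq_singleton {α : Type} [BEq α] [LawfulBEq α] (l : List α) (a : α)
    (h : l.Nodup) (ha : a ∈ l) : l.filter (fun x => x == a) = [a] := by
  induction l with
  | nil => cases ha
  | cons b t ih =>
    rcases List.mem_cons.mp ha with rfl | hm
    · rw [List.filter_cons_of_pos (by simp)]
      have ht : t.filter (fun x => x == a) = [] := by
        rw [List.filter_eq_nil_iff]
        intro x hx
        simp only [beq_iff_eq]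
        exact fun he => (List.nodup_cons.mp h).1 (he ▸ hx)
      rw [ht]
    · rw [List.filter_cons_of_neg (by simp; rintro rfl; exact (List.nodup_cons.mp h).1 hm)]
      exact ih (List.nodup_cons.mp h).2 hm

-- one position of the occurrence-index scan appends i to key k's list iff k occurs at i
theorem pv_occ_inner (w : List Char) (keys : List String) (k : String)
    (hk : k ∈ keys) (i : Int) (d : PySem.Dict String (List Int)) :
    ((PySem.Set.ofList (keys.map (fun k => (k.toList.length : Int)))).foldl
      (fun d L =>
        if (((String.ofList (PySem.List.slice w (some i) (some (i + L)))).toList.length : Int) == L)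
            && (PySem.Set.ofList keys).contains (String.ofList (PySem.List.slice w (some i) (some (i + L))))
        then d.modify (String.ofList (PySem.List.slice w (some i) (some (i + L)))) [] (· ++ [i]) else d)
      d).getD k []
    = d.getD k []
      ++ (if PySem.List.slice w (some i) (some (i + (k.toList.length : Int))) == k.toList
          then [i] else []) := by
  have hff :
      (PySem.Set.ofList (keys.map (fun k => (k.toList.length : Int)))).foldl
        (fun d L =>
          if (((String.ofList (PySem.List.slice w (some i) (some (i + L)))).toList.length : Int) == L)
              && (PySem.Set.ofList keys).contains (String.ofList (PySem.List.slice w (some i) (some (i + L))))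
          then d.modify (String.ofList (PySem.List.slice w (some i) (some (i + L)))) [] (· ++ [i]) else d)
        d
      = (((PySem.Set.ofList (keys.map (fun k => (k.toList.length : Int)))).filter
            (fun L => (((String.ofList (PySem.List.slice w (some i) (some (i + L)))).toList.length : Int) == L)
              && (PySem.Set.ofList keys).contains (String.ofList (PySem.List.slice w (some i) (some (i + L)))))).map
          (fun L => (String.ofList (PySem.List.slice w (some i) (some (i + L))), i))).foldl
          (fun d p => d.modify p.1 [] (· ++ [p.2])) d := by
    rw [List.foldl_map, List.foldl_filter]
  rw [hff]
  rw [PySem.Dict.getD_foldl_modify_append]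
  congr 1
  rw [List.filter_map, List.map_map]
  have hcomp :
      (((PySem.Set.ofList (keys.map (fun k => (k.toList.length : Int)))).filter
          (fun L => (((String.ofList (PySem.List.slice w (some i) (some (i + L)))).toList.length : Int) == L)
            && (PySem.Set.ofList keys).contains (String.ofList (PySem.List.slice w (some i) (some (i + L)))))).filter
        ((fun p => p.1 == k) ∘ (fun L => (String.ofList (PySem.List.slice w (some i) (some (i + L))), i))))
      = if PySem.List.slice w (some i) (some (i + (k.toList.length : Int))) == k.toList
        then [(k.toList.length : Int)] else [] := by
    rw [List.filter_filter]
    by_cases hs : (PySem.List.slice w (some i) (some (i + (k.toList.length : Int))) == k.toList) = true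
    · rw [if_pos hs]
      have hsl : PySem.List.slice w (some i) (some (i + (k.toList.length : Int))) = k.toList :=
        beq_iff_eq.mp hs
      have hc : (PySem.Set.ofList keys).contains k = true :=
        (PySem.Set.contains_iff _ _).mpr ((PySem.Set.mem_ofList _ _).mpr hk)
      have hcg : ∀ L ∈ PySem.Set.ofList (keys.map (fun k => (k.toList.length : Int))),
          ((((fun p => p.1 == k) ∘ (fun L => (String.ofList (PySem.List.slice w (some i) (some (i + L))), i))) L)
            && ((((String.ofList (PySem.List.slice w (some i) (some (i + L)))).toList.length : Int) == L)
              && (PySem.Set.ofList keys).contains (String.ofList (PySem.List.slice w (some i) (some (i + L))))))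
          = (L == (k.toList.length : Int)) := by
        intro L _
        by_cases hL : L = (k.toList.length : Int)
        · subst hL
          show ((String.ofList (PySem.List.slice w (some i) (some (i + (k.toList.length : Int)))) == k)
              && ((((String.ofList (PySem.List.slice w (some i) (some (i + (k.toList.length : Int))))).toList.length : Int) == (k.toList.length : Int))
                && (PySem.Set.ofList keys).contains (String.ofList (PySem.List.slice w (some i) (some (i + (k.toList.length : Int)))))))
            = ((k.toList.length : Int) == (k.toList.length : Int))
          rw [hsl, String.ofList_toList, hc]
          simp
        · have hR : (L == (k.toList.length : Int)) = false := beq_eq_false_iff_ne.mpr hL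
          rw [hR, Bool.eq_false_iff]
          intro hb
          simp only [Function.comp, Bool.and_eq_true, beq_iff_eq] at hb
          obtain ⟨he, hlen, _⟩ := hb
          have he2 : PySem.List.slice w (some i) (some (i + L)) = k.toList := by
            rw [← he, String.toList_ofList]
          rw [String.toList_ofList, he2] at hlen
          exact hL (by omega)
      rw [List.filter_congr hcg]
      exact pv_filter_eq_singleton _ _ (PySem.Set.nodup_ofList _)
        ((PySem.Set.mem_ofList _ _).mpr (List.mem_map_of_mem hk))
    · rw [if_neg (by simpa using hs)]
      rw [List.filter_eq_nil_iff]
      intro L _ hb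
      simp only [Function.comp, Bool.and_eq_true, beq_iff_eq] at hb
      obtain ⟨he, hlen, _⟩ := hb
      have he2 : PySem.List.slice w (some i) (some (i + L)) = k.toList := by
        rw [← he, String.toList_ofList]
      rw [String.toList_ofList, he2] at hlen
      rw [← hlen] at he2
      exact hs (beq_iff_eq.mpr he2)
  rw [hcomp]
  by_cases hs : (PySem.List.slice w (some i) (some (i + (k.toList.length : Int))) == k.toList) = true
  · rw [if_pos hs, if_pos hs]
    rfl
  · rw [if_neg (by simpa using hs), if_neg (by simpa using hs)]
    rfl

-- the full scan records exactly the positions (in [0, len(word))) where k occurs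
theorem pv_occIndex_getD0 (w : List Char) (keys : List String) (k : String) (hk : k ∈ keys) :
    (pvOccIndex w keys).getD k []
      = (PySem.List.pyRange 0 (w.length : Int) 1).filter
          (fun i => PySem.List.slice w (some i) (some (i + (k.toList.length : Int))) == k.toList) := by
  unfold pvOccIndex
  simp only []
  suffices h : ∀ m : Nat,
      (((PySem.List.pyRange 0 (m : Int) 1).foldl
        (fun d i => (PySem.Set.ofList (keys.map (fun k => (k.toList.length : Int)))).foldl
          (fun d L =>
            if (((String.ofList (PySem.List.slice w (some i) (some (i + L)))).toList.length : Int) == L)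
                && (PySem.Set.ofList keys).contains (String.ofList (PySem.List.slice w (some i) (some (i + L))))
            then d.modify (String.ofList (PySem.List.slice w (some i) (some (i + L)))) [] (· ++ [i]) else d)
          d)
        PySem.Dict.empty).getD k [])
      = (PySem.List.pyRange 0 (m : Int) 1).filter
          (fun i => PySem.List.slice w (some i) (some (i + (k.toList.length : Int))) == k.toList) by
    exact h w.length
  intro m
  induction m with
  | zero =>
    simp only [Nat.cast_zero]
    rw [PySem.List.pyRange_one_eq_nil (le_refl 0), List.foldl_nil, List.filter_nil,
      PySem.Dict.getD_empty]
  | succ m ih =>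
    have hcast : ((m + 1 : Nat) : Int) = (m : Int) + 1 := by push_cast; ring
    rw [hcast, PySem.List.pyRange_one_succ_right (by positivity), List.foldl_append,
      List.foldl_cons, List.foldl_nil, pv_occ_inner w keys k hk, ih, List.filter_append]
    congr 1
    rw [List.filter_singleton]
    by_cases hs : (PySem.List.slice w (some (m : Int)) (some ((m : Int) + (k.toList.length : Int))) == k.toList) = true
    · rw [hs]; rfl
    · rw [Bool.eq_false_iff.mpr hs]; rfl

-- positions past len(word) - len(k) cannot carry an occurrence, so the range can be cut
theorem pv_occIndex_getD (w : List Char) (keys : List String) (k : String)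
    (hk : k ∈ keys) (h1 : 1 ≤ k.toList.length) :
    (pvOccIndex w keys).getD k []
      = (PySem.List.pyRange 0 ((w.length : Int) - k.toList.length + 1) 1).filter
          (fun i => PySem.List.slice w (some i) (some (i + (k.toList.length : Int))) == k.toList) := by
  rw [pv_occIndex_getD0 w keys k hk]
  have hfalse : ∀ i : Int, 0 ≤ i → (w.length : Int) - k.toList.length < i →
      (PySem.List.slice w (some i) (some (i + (k.toList.length : Int))) == k.toList) = false := by
    intro i h0i hbig
    obtain ⟨j, rfl⟩ : ∃ j : Nat, i = (j : Int) := ⟨i.toNat, (Int.toNat_of_nonneg h0i).symm⟩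
    rw [PySem.List.slice_natCast_add]
    rw [beq_eq_false_iff_ne]
    intro he
    have hlen := congrArg List.length he
    rw [List.length_take, List.length_drop] at hlen
    omega
  by_cases hneg : (w.length : Int) - k.toList.length + 1 ≤ 0
  · rw [PySem.List.pyRange_one_eq_nil hneg, List.filter_nil, List.filter_eq_nil_iff]
    intro i hi
    rw [PySem.List.mem_pyRange_one] at hi
    rw [hfalse i hi.1 (by omega)]
    exact Bool.false_ne_true
  · rw [PySem.List.pyRange_one_append 0 ((w.length : Int) - k.toList.length + 1) (w.length : Int)
      (by omega) (by omega), List.filter_append]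
    have h2 : (PySem.List.pyRange ((w.length : Int) - k.toList.length + 1) (w.length : Int) 1).filter
        (fun i => PySem.List.slice w (some i) (some (i + (k.toList.length : Int))) == k.toList) = [] := by
      rw [List.filter_eq_nil_iff]
      intro i hi
      rw [PySem.List.mem_pyRange_one] at hi
      rw [hfalse i (by omega) (by omega)]
      exact Bool.false_ne_true
    rw [h2, List.append_nil]

-- the slice-comparison occurrence test agrees with startswith at nonnegative positions
theorem pv_slice_eq_startswith (w key : List Char) (j : Nat) :
    (PySem.List.slice w (some (j : Int)) (some ((j : Int) + (key.length : Int))) == key)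
      = PySem.Chars.startswith (w.drop j) key := by
  rw [PySem.List.slice_natCast_add]
  by_cases hp : key <+: w.drop j
  · have h1 : (w.drop j).take key.length = key := (List.prefix_iff_eq_take.mp hp).symm
    rw [h1, (PySem.Chars.startswith_iff _ _).mpr hp, beq_self_eq_true]
  · have h1 : PySem.Chars.startswith (w.drop j) key = false :=
      Bool.eq_false_iff.mpr (fun hb => hp ((PySem.Chars.startswith_iff _ _).mp hb))
    rw [h1, beq_eq_false_iff_ne]
    intro he
    exact hp (he ▸ List.take_prefix _ _)

-- a guarded fold whose guard is everywhere false does nothing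
theorem pv_foldl_ite_id {α β : Type} (c : α → Bool) (g : β → α → β) :
    ∀ (l : List α) (init : β), (∀ x ∈ l, c x = false) →
      l.foldl (fun t x => if c x then g t x else t) init = init := by
  intro l
  induction l with
  | nil => intro init _; rfl
  | cons a rest ih =>
    intro init h
    rw [List.foldl_cons, h a (List.mem_cons_self), ih]
    · rfl
    · intro x hx; exact h x (List.mem_cons_of_mem _ hx)

-- A's find loop equals a positional startswith scan, generalized over the start position
theorem pv_findLoop_eq_scan (w key : List Char) (vals : List String) (hk : 2 ≤ key.length) :
    ∀ (fuel start : Nat) (typos : PySem.Set String), start ≤ w.length → w.length - start < fuel →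
      pvFindLoopA w key vals fuel (start : Int) typos
        = (PySem.List.pyRange (start : Int) ((w.length : Int) - key.length + 1) 1).foldl
            (fun t i => if PySem.Chars.startswith (w.drop i.toNat) key
              then vals.foldl (fun t v => PySem.Set.add t (pvSubst w i.toNat key.length v)) t
              else t) typos := by
  intro fuel
  induction fuel with
  | zero => intro start typos _ hf; omega
  | succ fuel ih =>
    intro start typos hs hf
    rw [pvFindLoopA]
    by_cases hidx : PySem.Chars.findFrom w key (start : Int) none = -1
    · rw [if_pos hidx]
      have hno : ¬ key <:+: w.drop start :=
        (PySem.Chars.findFrom_natCast_eq_neg_one_iff w key start hs).mp hidx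
      refine (pv_foldl_ite_id _ _ _ _ ?_).symm
      intro i hi
      rw [PySem.List.mem_pyRange_one] at hi
      by_contra hb
      rw [Bool.not_eq_false, PySem.Chars.startswith_iff] at hb
      apply hno
      have h0i : (0 : Int) ≤ i := le_trans (Int.natCast_nonneg start) hi.1
      have hdd : w.drop i.toNat = (w.drop start).drop (i.toNat - start) := by
        rw [List.drop_drop]
        congr 1
        omega
      rw [hdd] at hb
      exact hb.isInfix.trans (List.drop_suffix _ _).isInfix
    · rw [if_neg hidx]
      obtain ⟨hle, hpre, hmin⟩ := PySem.Chars.findFrom_natCast_spec w key start hs hidx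
      have h0 : (0 : Int) ≤ PySem.Chars.findFrom w key (start : Int) none :=
        le_trans (Int.natCast_nonneg start) hle
      obtain ⟨j, hj⟩ : ∃ j : Nat, (j : Int) = PySem.Chars.findFrom w key (start : Int) none :=
        ⟨(PySem.Chars.findFrom w key (start : Int) none).toNat, Int.toNat_of_nonneg h0⟩
      rw [← hj] at hle hpre hmin ⊢
      simp only [Int.toNat_natCast] at hpre hmin ⊢
      have hsj : start ≤ j := by exact_mod_cast hle
      have hklen : key.length ≤ w.length - j := by
        have hl := hpre.length_le
        rwa [List.length_drop] at hl
      have hjlen : j + key.length ≤ w.length := by omega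
      rw [PySem.List.pyRange_one_append ((start : Int)) ((j : Int))
        (((w.length : Int) - key.length + 1))
        (by exact_mod_cast hsj) (by omega), List.foldl_append]
      have hseg1 : (PySem.List.pyRange (start : Int) (j : Int) 1).foldl
          (fun t i => if PySem.Chars.startswith (w.drop i.toNat) key
            then vals.foldl (fun t v => PySem.Set.add t (pvSubst w i.toNat key.length v)) t
            else t) typos = typos := by
        apply pv_foldl_ite_id
        intro i hi
        rw [PySem.List.mem_pyRange_one] at hi
        by_contra hb
        rw [Bool.not_eq_false, PySem.Chars.startswith_iff] at hb
        have h0i : (0 : Int) ≤ i := le_trans (Int.natCast_nonneg start) hi.1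
        have hij : i.toNat < j := by omega
        exact hmin i.toNat (by omega) hij hb
      rw [hseg1]
      rw [PySem.List.pyRange_one_cons (by omega), List.foldl_cons]
      rw [if_pos (by rw [PySem.Chars.startswith_iff, Int.toNat_natCast]; exact hpre)]
      have hcast : ((j : Int) + 1) = ((j + 1 : Nat) : Int) := by push_cast; ring
      rw [Int.toNat_natCast, hcast, ih (j + 1) _ (by omega) (by omega)]

-- B's per-key flattened candidate fold equals A's find loop
theorem pv_key_fold_eq (w key : List Char) (vals : List String) (hk : 2 ≤ key.length)
    (typos : PySem.Set String) :
    (((PySem.List.pyRange 0 ((w.length : Int) - key.length + 1) 1).filter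
        (fun i => PySem.List.slice w (some i) (some (i + (key.length : Int))) == key)).flatMap
        (fun i => vals.map (fun v => pvSubst w i.toNat key.length v))).foldl
      PySem.Set.add typos
      = pvFindLoopA w key vals (w.length + 2) 0 typos := by
  have h0 : ((0 : Nat) : Int) = (0 : Int) := rfl
  rw [← h0, pv_findLoop_eq_scan w key vals hk (w.length + 2) 0 typos (Nat.zero_le _) (by omega)]
  rw [List.foldl_flatMap, List.foldl_filter]
  apply PySem.List.foldl_congr_mem
  intro acc i hi
  rw [PySem.List.mem_pyRange_one] at hi
  obtain ⟨h0i, h1i⟩ := hi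
  obtain ⟨j, rfl⟩ : ∃ j : Nat, i = (j : Int) := ⟨i.toNat, (Int.toNat_of_nonneg (le_trans (by norm_num) h0i)).symm⟩
  rw [pv_slice_eq_startswith w key j, Int.toNat_natCast, List.foldl_map]

-- ===== VERDICT (by name: the statement is the Claim_ definition above) =====
theorem generate_typos_by_replacement_spec : Claim_equal_generate_typos_by_replacement := by
  intro word adjacent_keys custom_subs use_adjacent use_custom _
  unfold Spec_generate_typos_by_replacement
  unfold generate_typos_by_replacement generate_typos_by_replacement_alt
  simp only []
  rw [PySem.Set.ofList_eq_foldl, List.foldl_append]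
  -- phase 1: A's incremental per-position set building = fold of Set.add over singles
  have hphase1 :
      (PySem.List.enumerate word.toList 0).foldl
        (fun typos p =>
          ((if pvUseCustom use_custom custom_subs && (PySem.Dict.mk (custom_subs.getD [])).contains (String.ofList [p.2])
            then PySem.Set.update
              (if use_adjacent && (PySem.Dict.mk adjacent_keys).contains (String.ofList [p.2])
                then PySem.Set.update PySem.Set.empty ((PySem.Dict.mk adjacent_keys).getD (String.ofList [p.2]) [])
                else PySem.Set.empty)
              ((PySem.Dict.mk (custom_subs.getD [])).getD (String.ofList [p.2]) [])
            else (if use_adjacent && (PySem.Dict.mk adjacent_keys).contains (String.ofList [p.2])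
              then PySem.Set.update PySem.Set.empty ((PySem.Dict.mk adjacent_keys).getD (String.ofList [p.2]) [])
              else PySem.Set.empty))).foldl
            (fun t r => PySem.Set.add t (pvSubst word.toList p.1.toNat 1 r)) typos)
        PySem.Set.empty
      = ((PySem.List.enumerate word.toList 0).flatMap
          (fun p => (pvCharReps adjacent_keys (custom_subs.getD []) use_adjacent
              (pvUseCustom use_custom custom_subs) (String.ofList [p.2])).map
            (fun r => pvSubst word.toList p.1.toNat 1 r))).foldl
          PySem.Set.add ([] : PySem.Set String) := by
    rw [List.foldl_flatMap]
    apply PySem.List.foldl_congr_mem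
    intro acc p _
    rw [pv_rc_eq_ofList adjacent_keys (custom_subs.getD []) use_adjacent
      (pvUseCustom use_custom custom_subs) (String.ofList [p.2])]
    rw [pv_foldl_add_ofList, List.foldl_map]
  rw [hphase1]
  -- phase 2: A's per-key find loops = fold of Set.add over multis
  cases hc : pvUseCustom use_custom custom_subs with
  | false => rfl
  | true =>
    simp only [if_true]
    rw [List.foldl_flatMap, List.foldl_flatMap]
    apply PySem.List.foldl_congr_mem
    intro acc p hp
    by_cases hlen : 1 < p.1.toList.length
    · rw [if_pos hlen, if_pos hlen]
      have hmem : p.1 ∈ ((custom_subs.getD []).map Prod.fst).filter (fun k => 1 < k.toList.length) :=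
        List.mem_filter.mpr ⟨List.mem_map_of_mem hp, by simpa using hlen⟩
      rw [pv_occIndex_getD word.toList _ p.1 hmem (by omega)]
      rw [pv_key_fold_eq word.toList p.1.toList p.2 (by omega) acc]
    · rw [if_neg hlen, if_neg hlen, List.foldl_nil]
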